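-- pv_equiv track=rewrite | github.com/Lukayx/Archivos_Programacion | Python/REFORZAMIENTO-20210908/Formativa02_2021/Formativa02_2021.py | contadorPal
-- ===== SOURCE A (Python) =====
-- def contadorPal(frase):
-- 	nfrase = ""
-- 	x=frase.split("@@@")
-- 	for i in range(len(x)):
-- 		nfrase += x[i]
-- 		if i != len(x)-1:
-- 			nfrase += "@"
-- 	return len(x),nfrase
-- ===== SOURCE B (Python) =====
-- def contadorPal(frase):
--     # Two independent string operations: pieces = separator occurrences + 1,
--     # and the rebuilt string is a single non-overlapping substitution.
--     return frase.count("@@@") + 1, frase.replace("@@@", "@")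
-- ===== Notes on version B (the rewrite author's own statement) =====
-- stated objective: simpler
-- what changed: Replaces the split-then-index-loop rejoin with two direct string operations: the piece count is the non-overlapping separator count plus one, and the rebuilt string is a single substitution of the three-character separator by its one-character replacement; no parts list or loop is materialized.
import Mathlib
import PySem

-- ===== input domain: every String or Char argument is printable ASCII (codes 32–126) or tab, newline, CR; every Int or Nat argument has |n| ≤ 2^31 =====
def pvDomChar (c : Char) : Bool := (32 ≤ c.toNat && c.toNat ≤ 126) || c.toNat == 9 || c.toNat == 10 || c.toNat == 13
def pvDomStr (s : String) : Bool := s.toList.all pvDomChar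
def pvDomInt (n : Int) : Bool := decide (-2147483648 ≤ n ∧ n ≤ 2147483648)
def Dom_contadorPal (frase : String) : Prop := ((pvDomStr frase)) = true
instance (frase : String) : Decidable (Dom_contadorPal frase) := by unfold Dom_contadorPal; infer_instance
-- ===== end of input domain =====

-- B replaces A's split-and-index-loop rejoin by count("@@@")+1 and replace("@@@","@"): simpler, no parts list.

-- ===== PORT A =====
-- Strings are handled on .toList through PySem.Chars (exact; Lean's own String ops are kernel-opaque).
def contadorPal (frase : String) : Int × String :=
  let x : List (List Char) := PySem.Chars.splitOn frase.toList ['@', '@', '@']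
  let nfrase : List Char :=
    (PySem.List.pyRange 0 (x.length : Int) 1).foldl
      (fun nf i =>
        let nf := nf ++ PySem.List.pyGetD x i []
        if i ≠ (x.length : Int) - 1 then nf ++ ['@'] else nf)
      []
  ((x.length : Int), String.ofList nfrase)

-- ===== PORT B =====
def contadorPal_alt (frase : String) : Int × String :=
  ((PySem.Str.count frase "@@@" : Int) + 1, PySem.Str.replace frase "@@@" "@")

-- ===== PRECONDITION & SPEC =====
def Spec_contadorPal (frase : String) (out : Int × String) : Prop := out = contadorPal_alt frase
instance (frase : String) (out : Int × String) : Decidable (Spec_contadorPal frase out) := by unfold Spec_contadorPal; infer_instance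

-- ===== CLAIM (what is proved, stated in full; the proofs are below) =====
def Claim_equal_contadorPal : Prop := ∀ (frase : String), Dom_contadorPal frase → Spec_contadorPal frase (contadorPal frase)

-- ===== LEMMAS AND PROOFS =====

-- the pure split on separator "@@@"
def pvS : List Char → List (List Char)
  | [] => [[]]
  | c :: rest =>
    if ['@', '@', '@'].isPrefixOf (c :: rest) then
      [] :: pvS (rest.drop 2)
    else
      (pvS rest).modifyHead (c :: ·)
termination_by l => l.length
decreasing_by
  all_goals simp

lemma pvS_ne_nil (l : List Char) : pvS l ≠ [] := by
  induction l using pvS.induct with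
  | case1 => simp [pvS]
  | case2 c rest h ih => rw [pvS]; simp [h]
  | case3 c rest h ih =>
    rw [pvS]; simp only [if_neg h]
    cases hS : pvS rest with
    | nil => exact absurd hS ih
    | cons a t => simp [List.modifyHead]

lemma splitOn_go_eq (fuel : Nat) : ∀ (l cur : List Char) (accl : List (List Char)),
    l.length ≤ fuel →
    PySem.Chars.splitOn.go ['@', '@', '@'] (fuel + 1) l cur accl
      = accl.reverse ++ (pvS l).modifyHead (cur.reverse ++ ·) := by
  induction fuel with
  | zero =>
    intro l cur accl h
    have hl : l = [] := List.length_eq_zero_iff.mp (Nat.le_zero.mp h)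
    subst hl
    simp [PySem.Chars.splitOn.go, pvS]
  | succ f ih =>
    intro l cur accl h
    cases l with
    | nil => simp [PySem.Chars.splitOn.go, pvS]
    | cons c rest =>
      simp only [PySem.Chars.splitOn.go, List.length_cons, List.length_nil]
      by_cases hp : ['@', '@', '@'].isPrefixOf (c :: rest) = true
      · have hlen : 3 ≤ (c :: rest).length := by
          have := List.IsPrefix.length_le (List.isPrefixOf_iff_prefix.mp hp)
          simpa using this
        rw [if_pos hp]
        have hd : (List.drop 3 (c :: rest)).length ≤ f := by
          simp at h hlen ⊢; omega
        rw [ih _ _ _ hd]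
        rw [pvS, if_pos hp]
        rcases hS2 : pvS (rest.drop 2) with _ | ⟨a, t⟩ <;> simp [hS2, List.modifyHead]
      · rw [if_neg hp]
        have hr : rest.length ≤ f := by simp at h; omega
        rw [ih _ _ _ hr]
        rw [pvS, if_neg hp]
        rcases hS : pvS rest with _ | ⟨a, t⟩
        · exact absurd hS (pvS_ne_nil rest)
        · simp [List.modifyHead]

lemma count_go_eq (fuel : Nat) : ∀ (l : List Char) (a : Nat),
    l.length ≤ fuel →
    PySem.Chars.count.go ['@', '@', '@'] fuel l a = a + ((pvS l).length - 1) := by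
  induction fuel with
  | zero =>
    intro l a h
    have hl : l = [] := List.length_eq_zero_iff.mp (Nat.le_zero.mp h)
    subst hl
    simp [PySem.Chars.count.go, pvS]
  | succ f ih =>
    intro l a h
    cases l with
    | nil => simp [PySem.Chars.count.go, pvS]
    | cons c rest =>
      simp only [PySem.Chars.count.go, List.length_cons, List.length_nil]
      by_cases hp : ['@', '@', '@'].isPrefixOf (c :: rest) = true
      · have hlen : 3 ≤ (c :: rest).length := by
          have := List.IsPrefix.length_le (List.isPrefixOf_iff_prefix.mp hp)
          simpa using this
        rw [if_pos hp]
        have hd : (List.drop 3 (c :: rest)).length ≤ f := by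
          simp at h hlen ⊢; omega
        rw [ih _ _ hd]
        rw [pvS, if_pos hp]
        have := pvS_ne_nil (rest.drop 2)
        have hpos : 1 ≤ (pvS (rest.drop 2)).length := List.length_pos_iff.mpr this
        simp only [List.drop_succ_cons] at *
        simp [List.length_cons]
        omega
      · rw [if_neg hp]
        have hr : rest.length ≤ f := by simp at h; omega
        rw [ih _ _ hr]
        rw [pvS, if_neg hp]
        simp [List.length_modifyHead]

lemma replace_go_eq (fuel : Nat) : ∀ (l acc : List Char),
    l.length ≤ fuel →
    PySem.Chars.replace.go ['@', '@', '@'] ['@'] fuel l acc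
      = acc.reverse ++ PySem.Chars.join ['@'] (pvS l) := by
  induction fuel with
  | zero =>
    intro l acc h
    have hl : l = [] := List.length_eq_zero_iff.mp (Nat.le_zero.mp h)
    subst hl
    simp [PySem.Chars.replace.go, pvS, PySem.Chars.join, List.intercalate]
  | succ f ih =>
    intro l acc h
    cases l with
    | nil => simp [PySem.Chars.replace.go, pvS, PySem.Chars.join, List.intercalate]
    | cons c rest =>
      simp only [PySem.Chars.replace.go, List.length_cons, List.length_nil]
      by_cases hp : ['@', '@', '@'].isPrefixOf (c :: rest) = true
      · have hlen : 3 ≤ (c :: rest).length := by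
          have := List.IsPrefix.length_le (List.isPrefixOf_iff_prefix.mp hp)
          simpa using this
        rw [if_pos hp]
        have hd : (List.drop 3 (c :: rest)).length ≤ f := by
          simp at h hlen ⊢; omega
        rw [ih _ _ hd]
        rw [pvS, if_pos hp]
        rcases hS : pvS (rest.drop 2) with _ | ⟨a, t⟩
        · exact absurd hS (pvS_ne_nil _)
        · simp [hS, PySem.Chars.join, List.intercalate, List.intersperse]
      · rw [if_neg hp]
        have hr : rest.length ≤ f := by simp at h; omega
        rw [ih _ _ hr]
        rw [pvS, if_neg hp]
        rcases hS : pvS rest with _ | ⟨a, t⟩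
        · exact absurd hS (pvS_ne_nil rest)
        · cases t with
          | nil => simp [List.modifyHead, PySem.Chars.join, List.intercalate, List.intersperse]
          | cons b t' => simp [List.modifyHead, PySem.Chars.join, List.intercalate, List.intersperse]

lemma foldl_join (z : List Char) : ∀ (y : List (List Char)) (init : List Char),
    y.foldl (fun a v => a ++ v ++ ['@']) init ++ z
      = init ++ PySem.Chars.join ['@'] (y ++ [z]) := by
  intro y
  induction y with
  | nil => intro init; simp [PySem.Chars.join, List.intercalate]
  | cons h t ih =>
    intro init
    simp only [List.foldl_cons, List.cons_append]
    rw [ih]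
    cases t with
    | nil => simp [PySem.Chars.join, List.intercalate, List.intersperse]
    | cons b t' => simp [PySem.Chars.join, List.intercalate, List.intersperse]

lemma loop_eq (x : List (List Char)) :
    (PySem.List.pyRange 0 (x.length : Int) 1).foldl
      (fun nf i =>
        let nf := nf ++ PySem.List.pyGetD x i []
        if i ≠ (x.length : Int) - 1 then nf ++ ['@'] else nf)
      []
      = PySem.Chars.join ['@'] x := by
  rcases List.eq_nil_or_concat x with rfl | ⟨y, z, rfl⟩
  · simp [PySem.List.pyRange_one_eq_nil, PySem.Chars.join, List.intercalate]
  · rw [List.concat_eq_append]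
    have hn : (((y ++ [z]).length : Nat) : Int) = (y.length : Int) + 1 := by simp
    rw [hn, PySem.List.pyRange_one_succ_right (by positivity), List.foldl_append,
        List.foldl_cons, List.foldl_nil]
    have hcong :
        (PySem.List.pyRange 0 (y.length : Int) 1).foldl
          (fun nf i =>
            let nf := nf ++ PySem.List.pyGetD (y ++ [z]) i []
            if i ≠ (y.length : Int) + 1 - 1 then nf ++ ['@'] else nf) []
          = (PySem.List.pyRange 0 (y.length : Int) 1).foldl
              (fun nf i => (nf ++ PySem.List.pyGetD y i []) ++ ['@']) [] := by
      apply PySem.List.foldl_congr_mem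
      intro acc i hi
      rw [PySem.List.mem_pyRange_one] at hi
      obtain ⟨h0, h1⟩ := hi
      obtain ⟨k, rfl⟩ : ∃ k : Nat, (k : Int) = i := ⟨i.toNat, Int.toNat_of_nonneg h0⟩
      have hk : k < y.length := by exact_mod_cast h1
      have hne : (k : Int) ≠ (y.length : Int) + 1 - 1 := by
        intro hc; rw [add_sub_cancel_right] at hc; exact absurd (by exact_mod_cast hc) (Nat.ne_of_lt hk)
      simp only [ne_eq, hne, not_false_eq_true, if_true]
      simp [PySem.List.pyGetD_natCast, List.getD, List.getElem?_append_left hk]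
    rw [hcong, PySem.List.foldl_pyRange_zero_pyGetD' y [] (fun acc v => acc ++ v ++ ['@']) []]
    have hlast : PySem.List.pyGetD (y ++ [z]) ((y.length : Int) : Int) [] = z := by
      simp [PySem.List.pyGetD_natCast, List.getD]
    simp only [ne_eq, add_sub_cancel_right, not_true_eq_false, if_false, hlast]
    have := foldl_join z y []
    simpa using this

-- ===== VERDICT (by name: the statement is the Claim_ definition above) =====
lemma splitOn_eq_pvS (cs : List Char) :
    PySem.Chars.splitOn cs ['@', '@', '@'] = pvS cs := by
  show PySem.Chars.splitOn.go ['@', '@', '@'] (cs.length + 1) cs [] [] = pvS cs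
  rw [splitOn_go_eq cs.length cs [] [] (le_refl _)]
  rcases hS : pvS cs with _ | ⟨a, t⟩
  · exact absurd hS (pvS_ne_nil cs)
  · simp [List.modifyHead]

lemma count_eq_pvS (cs : List Char) :
    PySem.Chars.count cs ['@', '@', '@'] = (pvS cs).length - 1 := by
  rw [PySem.Chars.count]
  simp only [List.isEmpty_cons, Bool.false_eq_true, if_false]
  rw [count_go_eq cs.length cs 0 (le_refl _)]
  omega

lemma replace_eq_pvS (cs : List Char) :
    PySem.Chars.replace cs ['@', '@', '@'] ['@'] = PySem.Chars.join ['@'] (pvS cs) := by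
  rw [PySem.Chars.replace]
  simp only [List.isEmpty_cons, Bool.false_eq_true, if_false]
  rw [replace_go_eq cs.length cs [] (le_refl _)]
  simp

-- ===== VERDICT (by name: the statement is the Claim_ definition above) =====
theorem contadorPal_spec : Claim_equal_contadorPal := by
  intro frase _
  unfold Spec_contadorPal contadorPal contadorPal_alt
  have h3 : ("@@@" : String).toList = ['@', '@', '@'] := rfl
  have h1 : ("@" : String).toList = ['@'] := rfl
  dsimp only
  rw [splitOn_eq_pvS, loop_eq]
  have hpos : 1 ≤ (pvS frase.toList).length := List.length_pos_iff.mpr (pvS_ne_nil _)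
  refine Prod.ext ?_ ?_
  · show ((pvS frase.toList).length : Int) = (PySem.Str.count frase "@@@" : Int) + 1
    rw [PySem.Str.count, h3, count_eq_pvS]
    omega
  · show String.ofList (PySem.Chars.join ['@'] (pvS frase.toList)) = PySem.Str.replace frase "@@@" "@"
    rw [PySem.Str.replace, h3, h1, replace_eq_pvS]
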